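-- pv_equiv track=rewrite | github.com/ahmdbnrsl/data-structure-algorithm | maximum_modus_of_digit.py | max_digit_mod
-- ===== SOURCE A (Python) =====
-- def max_digit_mod(digit):
--     digit_str = str(digit)
--
--     current_digit = {}
--     for i, e in enumerate(digit_str):
--         if e not in current_digit: current_digit[e] = 1
--         else: current_digit[e] += 1
--
--     maximal = max(current_digit.values())
--     candidates = [int(d) for d, c in current_digit.items() if c == maximal]
--     return (max(candidates), maximal)
-- ===== SOURCE B (Python) =====
-- def max_digit_mod(digit):
--     s = str(digit)
--     best_v, best_c = 0, 0
--     for v, d in enumerate("0123456789"):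
--         c = 0
--         for ch in s:
--             if ch == d:
--                 c += 1
--         if c >= best_c:
--             best_v, best_c = v, c
--     return (best_v, best_c)
-- ===== Notes on version B (the rewrite author's own statement) =====
-- stated objective: alternative
-- what changed: Replaces the dict-of-counts pipeline (build counter, max of values, filter ties, int() each winner, max of candidates) by a single scan over the fixed alphabet '0'..'9' keeping a running (best digit, best count) pair with >= so later (larger) digits win ties; the '-' sign is never counted or passed to int().
-- crash fix: On negative inputs whose decimal representation has all-distinct characters A raises ValueError (the '-' key ties the maximal count and int('-') fails); B returns the most frequent digit and its count, e.g. max_digit_mod(-5) = (5, 1). — e.g. on max_digit_mod(-5): A raises ValueError, B returns (5, 1)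
import Mathlib
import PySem

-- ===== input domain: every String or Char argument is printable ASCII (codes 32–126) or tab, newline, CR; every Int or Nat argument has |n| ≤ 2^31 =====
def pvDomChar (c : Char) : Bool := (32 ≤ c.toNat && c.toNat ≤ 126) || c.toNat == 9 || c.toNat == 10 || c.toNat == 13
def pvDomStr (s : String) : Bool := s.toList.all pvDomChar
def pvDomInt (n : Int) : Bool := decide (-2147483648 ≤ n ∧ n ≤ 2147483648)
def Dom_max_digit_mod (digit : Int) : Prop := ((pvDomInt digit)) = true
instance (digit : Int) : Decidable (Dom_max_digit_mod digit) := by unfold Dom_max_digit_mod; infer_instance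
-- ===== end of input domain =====

-- B replaces A's dict-of-counts + max-of-values + tie-filter + int() + max-of-candidates pipeline
-- by one scan over the fixed alphabet '0'..'9' keeping a running (best digit, best count) pair.

-- ===== PORT A =====
def max_digit_mod (digit : Int) : Int × Int :=
  let digit_str := (PySem.Int.toStr digit).toList
  let current_digit : PySem.Dict Char Int :=
    (PySem.List.enumerate digit_str 0).foldl
      (fun d p => if !(d.contains p.2) then d.insert p.2 1 else d.insert p.2 (d.getD p.2 0 + 1))
      PySem.Dict.empty
  -- max(...) never sees an empty list: str(digit) is nonempty
  let maximal := (PySem.List.max? current_digit.values (fun x => x)).getD 0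
  -- [int(d) for d, c in items if c == maximal]; int(d) raises ValueError when d = '-' (outside Pre_)
  match (current_digit.items.filter (fun p => p.2 == maximal)).mapM
      (fun p => PySem.Int.ofChars? [p.1]) with
  | some candidates => ((PySem.List.max? candidates (fun x => x)).getD 0, maximal)
  | none => (0, 0)   -- Python raises ValueError here; excluded by Pre_

-- ===== PORT B =====
def max_digit_mod_alt (digit : Int) : Int × Int :=
  let s := (PySem.Int.toStr digit).toList
  (PySem.List.enumerate "0123456789".toList 0).foldl
    (fun best p =>
      let c : Int := s.foldl (fun c ch => if ch == p.2 then c + 1 else c) 0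
      if best.2 ≤ c then (p.1, c) else best)
    (0, 0)

-- ===== PRECONDITION & SPEC =====
-- Pre_ excludes exactly the inputs on which A raises ValueError: a negative digit whose decimal
-- string has all-distinct characters, so the '-' key ties the maximal count and int('-') fails.
def Pre_max_digit_mod (digit : Int) : Prop :=
  0 ≤ digit ∨ ¬ (PySem.Int.toChars digit).Nodup
instance (digit : Int) : Decidable (Pre_max_digit_mod digit) := by
  unfold Pre_max_digit_mod; infer_instance
def pvWitness_max_digit_mod : Int := 100

-- On negative inputs whose decimal representation has all-distinct characters A raises ValueError
-- (int('-') on the tying '-' key); B returns the most frequent digit and its count.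
def Raises_max_digit_mod (digit : Int) : Prop :=
  digit < 0 ∧ (PySem.Int.toChars digit).Nodup
instance (digit : Int) : Decidable (Raises_max_digit_mod digit) := by
  unfold Raises_max_digit_mod; infer_instance
def pvRaiseWitness_max_digit_mod : Int := -5
def pvRaiseWitnessOut_max_digit_mod : Int × Int := (5, 1)

def Spec_max_digit_mod (digit : Int) (out : Int × Int) : Prop := out = max_digit_mod_alt digit
instance (digit : Int) (out : Int × Int) : Decidable (Spec_max_digit_mod digit out) := by
  unfold Spec_max_digit_mod; infer_instance

-- ===== CLAIM (what is proved, stated in full; the proofs are below) =====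
def Claim_equal_max_digit_mod : Prop :=
  ∀ (digit : Int), Dom_max_digit_mod digit → Pre_max_digit_mod digit →
    Spec_max_digit_mod digit (max_digit_mod digit)
def Claim_raises_max_digit_mod : Prop :=
  (∀ (digit : Int), Dom_max_digit_mod digit → Raises_max_digit_mod digit →
      ¬ Pre_max_digit_mod digit) ∧
  (Dom_max_digit_mod (pvRaiseWitness_max_digit_mod) ∧
   Raises_max_digit_mod (pvRaiseWitness_max_digit_mod) ∧
   max_digit_mod_alt (pvRaiseWitness_max_digit_mod) = pvRaiseWitnessOut_max_digit_mod)

-- ===== LEMMAS AND PROOFS =====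

/-- The ten decimal digit characters. -/
def pvDIG : List Char := ['0', '1', '2', '3', '4', '5', '6', '7', '8', '9']

/-- Integer value of a decimal digit character. -/
def pvVal (c : Char) : Int := (c.toNat : Int) - 48

lemma pv_toDigitsCore_subset :
    ∀ (f n : ℕ) (acc : List Char) (c : Char),
      c ∈ Nat.toDigitsCore 10 f n acc → c ∈ acc ∨ c ∈ pvDIG := by
  intro f
  induction f with
  | zero => intro n acc c h; simp only [Nat.toDigitsCore] at h; exact Or.inl h
  | succ f ih =>
    intro n acc c h
    simp only [Nat.toDigitsCore] at h
    have hdig : (n % 10).digitChar ∈ pvDIG := by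
      have h10 : n % 10 < 10 := Nat.mod_lt _ (by norm_num)
      interval_cases h' : n % 10 <;> decide
    split at h
    · rcases List.mem_cons.mp h with h | h
      · exact Or.inr (h ▸ hdig)
      · exact Or.inl h
    · rcases ih _ _ _ h with h | h
      · rcases List.mem_cons.mp h with h | h
        · exact Or.inr (h ▸ hdig)
        · exact Or.inl h
      · exact Or.inr h

lemma pv_toDigitsCore_len :
    ∀ (f n : ℕ) (acc : List Char), acc.length ≤ (Nat.toDigitsCore 10 f n acc).length := by
  intro f
  induction f with
  | zero => intro n acc; simp [Nat.toDigitsCore]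
  | succ f ih =>
    intro n acc
    simp only [Nat.toDigitsCore]
    split
    · simp
    · calc acc.length ≤ ((n % 10).digitChar :: acc).length := by simp
        _ ≤ _ := ih _ _

lemma pv_toDigits_ne_nil (n : ℕ) : Nat.toDigits 10 n ≠ [] := by
  unfold Nat.toDigits
  simp only [Nat.toDigitsCore]
  split
  · simp
  · intro h
    have := pv_toDigitsCore_len n (n / 10) [(n % 10).digitChar]
    rw [h] at this
    simp at this

lemma pv_toDigits_subset (n : ℕ) {c : Char} (h : c ∈ Nat.toDigits 10 n) : c ∈ pvDIG := by
  rcases pv_toDigitsCore_subset _ _ _ _ h with h | h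
  · simp at h
  · exact h

lemma pv_L_ne_nil (digit : Int) : PySem.Int.toChars digit ≠ [] := by
  unfold PySem.Int.toChars
  split
  · simp
  · exact pv_toDigits_ne_nil _

lemma pv_L_mem {digit : Int} {c : Char} (h : c ∈ PySem.Int.toChars digit) :
    c = '-' ∨ c ∈ pvDIG := by
  unfold PySem.Int.toChars at h
  split at h
  · rcases List.mem_cons.mp h with h | h
    · exact Or.inl h
    · exact Or.inr (pv_toDigits_subset _ h)
  · exact Or.inr (pv_toDigits_subset _ h)

lemma pv_L_mem_nonneg {digit : Int} (hd : 0 ≤ digit) {c : Char}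
    (h : c ∈ PySem.Int.toChars digit) : c ∈ pvDIG := by
  unfold PySem.Int.toChars at h
  rw [if_neg (by omega)] at h
  exact pv_toDigits_subset _ h

lemma pv_L_count_dash (digit : Int) : (PySem.Int.toChars digit).count '-' ≤ 1 := by
  have hnotin : ∀ n : ℕ, '-' ∉ Nat.toDigits 10 n := by
    intro n h
    have := pv_toDigits_subset n h
    simp [pvDIG] at this
  unfold PySem.Int.toChars
  split
  · rw [List.count_cons]
    simp [List.count_eq_zero.mpr (hnotin _)]
  · simp [List.count_eq_zero.mpr (hnotin _)]

lemma pv_L_exists_digit (digit : Int) : ∃ δ ∈ pvDIG, δ ∈ PySem.Int.toChars digit := by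
  unfold PySem.Int.toChars
  split
  · obtain ⟨c, hc⟩ := List.exists_mem_of_ne_nil _ (pv_toDigits_ne_nil digit.natAbs)
    exact ⟨c, pv_toDigits_subset _ hc, List.mem_cons_of_mem _ hc⟩
  · obtain ⟨c, hc⟩ := List.exists_mem_of_ne_nil _ (pv_toDigits_ne_nil digit.toNat)
    exact ⟨c, pv_toDigits_subset _ hc, hc⟩

/-- Behaviour of B's running-best fold over a list of (index, char) pairs with strictly
    increasing indices. -/
lemma pv_best_fold (cnt : Char → Int) :
    ∀ (l : List (Int × Char)) (a : Int × Int),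
      l.Pairwise (fun p q => p.1 < q.1) →
      (l.foldl (fun acc p => if acc.2 ≤ cnt p.2 then (p.1, cnt p.2) else acc) a = a ∧
        ∀ p ∈ l, cnt p.2 < a.2) ∨
      (∃ p ∈ l,
        l.foldl (fun acc p => if acc.2 ≤ cnt p.2 then (p.1, cnt p.2) else acc) a
          = (p.1, cnt p.2) ∧
        a.2 ≤ cnt p.2 ∧ (∀ q ∈ l, cnt q.2 ≤ cnt p.2) ∧
        (∀ q ∈ l, cnt q.2 = cnt p.2 → q.1 ≤ p.1)) := by
  intro l
  induction l with
  | nil => intro a _; exact Or.inl ⟨rfl, by simp⟩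
  | cons x t ih =>
    intro a hpw
    have hpw' := (List.pairwise_cons.mp hpw)
    rw [List.foldl_cons]
    by_cases hx : a.2 ≤ cnt x.2
    · rw [if_pos hx]
      rcases ih (x.1, cnt x.2) hpw'.2 with ⟨heq, hlt⟩ | ⟨p, hp, heq, hle, hmax, htie⟩
      · refine Or.inr ⟨x, List.mem_cons_self .., heq, hx, ?_, ?_⟩
        · intro q hq
          rcases List.mem_cons.mp hq with h | h
          · exact le_of_eq (by rw [h])
          · exact le_of_lt (hlt q h)
        · intro q hq hq2
          rcases List.mem_cons.mp hq with h | h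
          · exact le_of_eq (by rw [h])
          · have := hlt q h; simp only [] at this; omega
      · refine Or.inr ⟨p, List.mem_cons_of_mem _ hp, heq, le_trans hx hle, ?_, ?_⟩
        · intro q hq
          rcases List.mem_cons.mp hq with h | h
          · exact h ▸ hle
          · exact hmax q h
        · intro q hq hq2
          rcases List.mem_cons.mp hq with h | h
          · exact le_of_lt (h ▸ hpw'.1 p hp)
          · exact htie q h hq2
    · rw [if_neg hx]
      rw [not_le] at hx
      rcases ih a hpw'.2 with ⟨heq, hlt⟩ | ⟨p, hp, heq, hle, hmax, htie⟩
      · refine Or.inl ⟨heq, ?_⟩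
        intro q hq
        rcases List.mem_cons.mp hq with h | h
        · exact h ▸ hx
        · exact hlt q h
      · refine Or.inr ⟨p, List.mem_cons_of_mem _ hp, heq, hle, ?_, ?_⟩
        · intro q hq
          rcases List.mem_cons.mp hq with h | h
          · exact le_of_lt (lt_of_lt_of_le (h ▸ hx) hle)
          · exact hmax q h
        · intro q hq hq2
          rcases List.mem_cons.mp hq with h | h
          · exact absurd hq2 (by have := h ▸ hx; omega)
          · exact htie q h hq2

lemma pv_mapM_opt {α β : Type} (f : α → Option β) (g : α → β) :
    ∀ l : List α, (∀ x ∈ l, f x = some (g x)) → l.mapM f = some (l.map g) := by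
  intro l h
  induction l with
  | nil => rfl
  | cons x t ih =>
    rw [List.mapM_cons, h x (List.mem_cons_self ..),
      ih (fun y hy => h y (List.mem_cons_of_mem _ hy))]
    rfl

lemma pv_enum_lit :
    PySem.List.enumerate "0123456789".toList 0 =
      [((0 : Int), '0'), (1, '1'), (2, '2'), (3, '3'), (4, '4'),
       (5, '5'), (6, '6'), (7, '7'), (8, '8'), (9, '9')] := by
  decide

lemma pv_digit_enum {k : Char} (hk : k ∈ pvDIG) :
    (pvVal k, k) ∈ PySem.List.enumerate "0123456789".toList 0 ∧
      PySem.Int.ofChars? [k] = some (pvVal k) := by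
  fin_cases hk <;> exact ⟨by decide, by decide⟩

lemma pv_enum_digit {p : Int × Char} (hp : p ∈ PySem.List.enumerate "0123456789".toList 0) :
    p.2 ∈ pvDIG ∧ p.1 = pvVal p.2 := by
  rw [pv_enum_lit] at hp
  fin_cases hp <;> exact ⟨by decide, by decide⟩

-- ===== VERDICT (by name: the statement is the Claim_ definition above) =====
theorem max_digit_mod_spec : Claim_equal_max_digit_mod := by
  intro digit _ hpre
  unfold Spec_max_digit_mod
  set C := PySem.Int.toChars digit with hC
  set cnt : Char → Int := fun c => (C.count c : Int) with hcnt
  -- ===== B side =====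
  have hB : ∃ p ∈ PySem.List.enumerate "0123456789".toList 0,
      max_digit_mod_alt digit = (p.1, cnt p.2) ∧
      (∀ q ∈ PySem.List.enumerate "0123456789".toList 0, cnt q.2 ≤ cnt p.2) ∧
      (∀ q ∈ PySem.List.enumerate "0123456789".toList 0, cnt q.2 = cnt p.2 → q.1 ≤ p.1) := by
    have hstep : (fun (best : Int × Int) (p : Int × Char) =>
        let c : Int := C.foldl (fun c ch => if ch == p.2 then c + 1 else c) 0
        if best.2 ≤ c then (p.1, c) else best)
        = (fun best p => if best.2 ≤ cnt p.2 then (p.1, cnt p.2) else best) := by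
      funext best p
      simp only [PySem.List.foldl_beq_add_one, zero_add]
      rfl
    have hBdef : max_digit_mod_alt digit
        = (PySem.List.enumerate "0123456789".toList 0).foldl
            (fun best p => if best.2 ≤ cnt p.2 then (p.1, cnt p.2) else best) (0, 0) := by
      simp only [max_digit_mod_alt, PySem.Int.toList_toStr, ← hC, hstep]
    have hpw : (PySem.List.enumerate "0123456789".toList 0).Pairwise (fun p q => p.1 < q.1) := by
      rw [pv_enum_lit]; decide
    rcases pv_best_fold cnt (PySem.List.enumerate "0123456789".toList 0) (0, 0) hpw with
      ⟨_, hlt⟩ | ⟨p, hp, heq, _, hmax, htie⟩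
    · exfalso
      obtain ⟨δ, hδd, _⟩ := pv_L_exists_digit digit
      have := hlt _ (pv_digit_enum hδd).1
      simp only [hcnt] at this
      omega
    · exact ⟨p, hp, by rw [hBdef, heq], hmax, htie⟩
  obtain ⟨p, hp, hBval, hmax, htie⟩ := hB
  have hpdig := pv_enum_digit hp
  -- ===== A side =====
  -- the counting loop builds Counter(str(digit))
  have hdict : (PySem.List.enumerate C 0).foldl
      (fun (d : PySem.Dict Char Int) (p : Int × Char) =>
        if !(d.contains p.2) then d.insert p.2 1 else d.insert p.2 (d.getD p.2 0 + 1))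
      PySem.Dict.empty = PySem.Dict.counter C := by
    have hfun : (fun (d : PySem.Dict Char Int) (p : Int × Char) =>
        if !(d.contains p.2) then d.insert p.2 1 else d.insert p.2 (d.getD p.2 0 + 1))
        = (fun d p => d.insert p.2 (d.getD p.2 0 + 1)) := by
      funext d p
      cases hcb : d.contains p.2 with
      | false => simp [PySem.Dict.getD_of_not_contains d 0 hcb]
      | true => simp
    rw [hfun]
    have h2 : (PySem.List.enumerate C 0).foldl
        (fun (d : PySem.Dict Char Int) (p : Int × Char) => d.insert p.2 (d.getD p.2 0 + 1))
        PySem.Dict.empty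
        = C.foldl (fun d x => d.insert x (d.getD x 0 + 1)) PySem.Dict.empty := by
      conv_rhs => rw [← PySem.List.map_snd_enumerate C 0]
      rw [List.foldl_map]
    rw [h2, PySem.Dict.foldl_insert_getD_add_one_eq_counter]
  set K := PySem.Set.ofList C with hK
  have hvals : (PySem.Dict.counter C).values = K.map cnt := by
    show (PySem.Dict.counter C).items.map (·.2) = K.map cnt
    rw [PySem.Dict.items_counter, List.map_map]
    rfl
  -- maximal
  have hKne : K.map cnt ≠ [] := by
    obtain ⟨c, hc⟩ := List.exists_mem_of_ne_nil _ (pv_L_ne_nil digit)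
    have : c ∈ K := (PySem.Set.mem_ofList ..).mpr hc
    intro h
    rw [List.map_eq_nil_iff] at h
    rw [h] at this
    simp at this
  obtain ⟨Ma, hMa⟩ : ∃ m, PySem.List.max? (K.map cnt) (fun x => x) = some m := by
    cases h : PySem.List.max? (K.map cnt) (fun x => x) with
    | none => exact absurd ((PySem.List.max?_eq_none_iff ..).mp h) hKne
    | some m => exact ⟨m, rfl⟩
  have hMaMax : ∀ y ∈ K.map cnt, y ≤ Ma := fun y hy => PySem.List.max?_isMax hMa y hy
  obtain ⟨k0, hk0K, hk0⟩ : ∃ k0 ∈ K, cnt k0 = Ma := by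
    obtain ⟨k0, h1, h2⟩ := List.mem_map.mp (PySem.List.max?_mem hMa)
    exact ⟨k0, h1, h2⟩
  -- every key whose count ties the maximum is a decimal digit character
  have hwin_dig : ∀ k ∈ K, cnt k = Ma → k ∈ pvDIG := by
    intro k hkK hkMa
    have hkC : k ∈ C := (PySem.Set.mem_ofList ..).mp hkK
    rcases hpre with hpos | hdup
    · exact pv_L_mem_nonneg hpos hkC
    · rcases pv_L_mem hkC with rfl | h
      · exfalso
        rw [List.nodup_iff_count_le_one] at hdup
        push Not at hdup
        obtain ⟨a, ha⟩ := hdup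
        rw [← hC] at ha
        have haC : a ∈ C := List.count_pos_iff.mp (by omega)
        have haK : a ∈ K := (PySem.Set.mem_ofList ..).mpr haC
        have h2 : cnt a ≤ Ma := hMaMax _ (List.mem_map_of_mem haK)
        have h3 := pv_L_count_dash digit
        rw [← hC] at h3
        simp only [hcnt] at hkMa h2
        omega
      · exact h
  -- the winners' list of the filter, as digit values
  have hfilt : (PySem.Dict.counter C).items.filter (fun p => p.2 == Ma)
      = (K.filter (fun k => cnt k == Ma)).map (fun k => (k, cnt k)) := by
    rw [PySem.Dict.items_counter, List.filter_map]
    rfl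
  set Kw := K.filter (fun k => cnt k == Ma) with hKw
  have hKw_mem : ∀ k ∈ Kw, k ∈ K ∧ cnt k = Ma := by
    intro k hk
    have := List.mem_filter.mp hk
    exact ⟨this.1, by simpa using this.2⟩
  have hmapM : (Kw.map (fun k => (k, cnt k))).mapM (fun p => PySem.Int.ofChars? [p.1])
      = some (Kw.map pvVal) := by
    have h := pv_mapM_opt (fun p : Char × Int => PySem.Int.ofChars? [p.1])
      (fun p : Char × Int => pvVal p.1) (Kw.map (fun k => (k, cnt k))) ?_
    · rw [h, List.map_map]; rfl
    · intro x hx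
      obtain ⟨k, hk, rfl⟩ := List.mem_map.mp hx
      have hkd := hwin_dig k (hKw_mem k hk).1 (hKw_mem k hk).2
      exact (pv_digit_enum hkd).2
  -- max of the candidates
  have hk0w : k0 ∈ Kw := List.mem_filter.mpr ⟨hk0K, by simp [hk0]⟩
  obtain ⟨A1, hA1⟩ : ∃ m, PySem.List.max? (Kw.map pvVal) (fun x => x) = some m := by
    cases h : PySem.List.max? (Kw.map pvVal) (fun x => x) with
    | none =>
      exfalso
      have := (PySem.List.max?_eq_none_iff ..).mp h
      rw [List.map_eq_nil_iff] at this
      rw [this] at hk0w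
      simp at hk0w
    | some m => exact ⟨m, rfl⟩
  have hA1Max : ∀ y ∈ Kw.map pvVal, y ≤ A1 := fun y hy => PySem.List.max?_isMax hA1 y hy
  obtain ⟨k1, hk1w, hk1⟩ : ∃ k1 ∈ Kw, pvVal k1 = A1 := by
    obtain ⟨k1, h1, h2⟩ := List.mem_map.mp (PySem.List.max?_mem hA1)
    exact ⟨k1, h1, h2⟩
  -- assemble A's value
  have hAval : max_digit_mod digit = (A1, Ma) := by
    simp only [max_digit_mod, PySem.Int.toList_toStr, ← hC, hdict, hvals, hMa, Option.getD_some,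
      hfilt, hmapM, hA1]
  -- ===== the two values coincide =====
  have hMaB : Ma = cnt p.2 := by
    have h1 : cnt k0 ≤ cnt p.2 :=
      hmax _ (pv_digit_enum (hwin_dig k0 hk0K hk0)).1
    obtain ⟨δ, hδd, hδC⟩ := pv_L_exists_digit digit
    have h2 : cnt δ ≤ cnt p.2 := hmax _ (pv_digit_enum hδd).1
    have h3 : (0 : Int) < cnt δ := by
      simp only [hcnt]
      exact_mod_cast List.count_pos_iff.mpr hδC
    have h4 : p.2 ∈ C := by
      have : (0 : Int) < cnt p.2 := lt_of_lt_of_le h3 h2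
      simp only [hcnt] at this
      exact List.count_pos_iff.mp (by omega)
    have h5 : cnt p.2 ≤ Ma :=
      hMaMax _ (List.mem_map_of_mem ((PySem.Set.mem_ofList ..).mpr h4))
    omega
  have hA1B : A1 = p.1 := by
    have h1 : pvVal k1 ≤ p.1 := by
      apply htie _ (pv_digit_enum (hwin_dig k1 (hKw_mem k1 hk1w).1 (hKw_mem k1 hk1w).2)).1
      rw [(hKw_mem k1 hk1w).2, hMaB]
    have hp2C : p.2 ∈ C := by
      obtain ⟨δ, hδd, hδC⟩ := pv_L_exists_digit digit
      have h2 : cnt δ ≤ cnt p.2 := hmax _ (pv_digit_enum hδd).1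
      have h3 : (0 : Int) < cnt δ := by
        simp only [hcnt]
        exact_mod_cast List.count_pos_iff.mpr hδC
      simp only [hcnt] at h2 h3 ⊢
      exact List.count_pos_iff.mp (by omega)
    have hp2w : p.2 ∈ Kw := by
      apply List.mem_filter.mpr
      exact ⟨(PySem.Set.mem_ofList ..).mpr hp2C, by simp [hMaB]⟩
    have h2 : pvVal p.2 ≤ A1 := hA1Max _ (List.mem_map_of_mem hp2w)
    rw [hpdig.2] at hBval ⊢
    omega
  rw [hAval, hBval, hMaB, hA1B]

def max_digit_mod_raises : Claim_raises_max_digit_mod := by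
  unfold Claim_raises_max_digit_mod
  refine ⟨?_, ?_, ?_, ?_⟩
  · intro digit _ hr hp
    rcases hp with hp | hp
    · exact absurd hp (by have := hr.1; omega)
    · exact hp hr.2
  · decide
  · decide
  · decide
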